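-- pv_equiv track=rewrite | github.com/jobran4799/Beyond_Dev | main.py | dfs
-- ===== SOURCE A (Python) =====
-- def dfs(grid, x, y, tx, ty, k, visited):
--     # Base case: If out of moves or out of bounds, return False
--     if k < 0 or x < 0 or x >= len(grid) or y < 0 or y >= len(grid[0]) or grid[x][y] == 1 or visited[x][y][k]:
--         return False
--
--     # Base case: If reached the target, return True
--     if x == tx and y == ty:
--         return True
--
--     # Mark the current position as visited with remaining moves
--     visited[x][y][k] = True
--
--     # Explore all four possible directions
--     result = dfs(grid, x + 1, y, tx, ty, k - 1, visited) or \
--              dfs(grid, x - 1, y, tx, ty, k - 1, visited) or \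
--              dfs(grid, x, y + 1, tx, ty, k - 1, visited) or \
--              dfs(grid, x, y - 1, tx, ty, k - 1, visited)
--
--     # Mark the current position as not visited for backtracking
--     visited[x][y][k] = False
--
--     return result
-- ===== SOURCE B (Python) =====
-- def dfs(grid, x, y, tx, ty, k, visited):
--     """Return True iff the target cell (tx, ty) can be reached from (x, y)
--     within k moves, stepping up/down/left/right through open cells
--     (grid value != 1), without ever entering a state (cell, moves-left)
--     that is marked in `visited`.
--
--     Layered dynamic program over the remaining-move budget j = 0..k:
--     `reachable` is the set of cells from which the target is reachable
--     when j moves remain."""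
--     rows = len(grid)
--     cols = len(grid[0]) if grid else 0
--     if k < 0 or not (0 <= x < rows and 0 <= y < cols):
--         return False
--     reachable = set()
--     for j in range(k + 1):
--         reachable = {
--             (a, b)
--             for a in range(rows)
--             for b in range(cols)
--             if grid[a][b] != 1 and not visited[a][b][j]
--             and ((a, b) == (tx, ty)
--                  or (a + 1, b) in reachable or (a - 1, b) in reachable
--                  or (a, b + 1) in reachable or (a, b - 1) in reachable)
--         }
--     return (x, y) in reachable
-- ===== Notes on version B (the rewrite author's own statement) =====
-- stated objective: alternative
-- what changed: Replaced the exponential backtracking recursion over (cell, remaining-moves) states by a layered dynamic program that computes, for each remaining-move budget j = 0..k, the set of cells from which the target is reachable, and looks the start cell up in the last layer; Pre_ excludes ragged grid/visited shapes where one program can hit an IndexError the other avoids.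
import Mathlib
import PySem

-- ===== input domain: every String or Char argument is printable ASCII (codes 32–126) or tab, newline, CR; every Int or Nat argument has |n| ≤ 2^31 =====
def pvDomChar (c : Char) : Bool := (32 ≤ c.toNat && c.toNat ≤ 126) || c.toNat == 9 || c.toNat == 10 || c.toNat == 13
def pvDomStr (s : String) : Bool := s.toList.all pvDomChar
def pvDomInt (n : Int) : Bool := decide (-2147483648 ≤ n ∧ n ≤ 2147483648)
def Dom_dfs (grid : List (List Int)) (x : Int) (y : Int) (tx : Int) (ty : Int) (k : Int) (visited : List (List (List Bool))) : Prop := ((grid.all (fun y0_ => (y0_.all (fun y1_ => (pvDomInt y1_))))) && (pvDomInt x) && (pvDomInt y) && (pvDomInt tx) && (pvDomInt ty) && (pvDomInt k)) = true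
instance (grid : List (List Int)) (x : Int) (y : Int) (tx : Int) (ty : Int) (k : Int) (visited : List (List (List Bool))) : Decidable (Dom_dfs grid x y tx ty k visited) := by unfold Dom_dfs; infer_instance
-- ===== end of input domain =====

-- B replaces A's backtracking recursion over (cell, remaining-moves) states by a layered dynamic
-- program over the remaining-move budget (objective: alternative). A temporarily marks
-- visited[x][y][k] and restores it before returning (no net mutation of its argument); the port
-- threads that state and the equivalence is about the return value.

-- ===== PORT A =====
-- shared Python-indexing accessors (len(grid[0]), grid[a][b], visited[a][b][j]); the .getD defaults
-- are only reachable outside Pre_dfs (where the Python raises IndexError)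
def pvRowLen (grid : List (List Int)) : Int := ((PySem.List.pyGet? grid 0).getD []).length
def pvCell (grid : List (List Int)) (a b : Int) : Int :=
  (PySem.List.pyGet? ((PySem.List.pyGet? grid a).getD []) b).getD 0
def pvVis (w : List (List (List Bool))) (a b j : Int) : Bool :=
  (PySem.List.pyGet? ((PySem.List.pyGet? ((PySem.List.pyGet? w a).getD []) b).getD []) j).getD false
-- visited[a][b][j] = v (in-place mutation, modelled functionally; indices are ≥ 0 when A assigns)
def pvMark (w : List (List (List Bool))) (a b j : Int) (v : Bool) : List (List (List Bool)) :=
  w.modify a.toNat (fun p => p.modify b.toNat (fun c => c.set j.toNat v))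

-- termination helpers for the two budget-recursions (cited by name in decreasing_by)
lemma pv_guard_k {k : Int} {P : Prop} (h : ¬(k < 0 ∨ P)) : 0 ≤ k :=
  le_of_not_gt fun hk => h (Or.inl hk)
lemma pv_dec {k : Int} (h : 0 ≤ k) : (k - 1 + 1).toNat < (k + 1).toNat := by omega

def dfsA (grid : List (List Int)) (x y tx ty k : Int) (visited : List (List (List Bool))) :
    Bool × List (List (List Bool)) :=
  if k < 0 ∨ x < 0 ∨ (grid.length : Int) ≤ x ∨ y < 0 ∨ pvRowLen grid ≤ y ∨
      pvCell grid x y = 1 ∨ pvVis visited x y k = true then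
    (false, visited)
  else if x = tx ∧ y = ty then (true, visited)
  else
    let v1 := pvMark visited x y k true
    let p1 := dfsA grid (x+1) y tx ty (k-1) v1
    let p2 := if p1.1 then p1 else dfsA grid (x-1) y tx ty (k-1) p1.2
    let p3 := if p2.1 then p2 else dfsA grid x (y+1) tx ty (k-1) p2.2
    let p4 := if p3.1 then p3 else dfsA grid x (y-1) tx ty (k-1) p3.2
    (p4.1, pvMark p4.2 x y k false)
termination_by (k+1).toNat
decreasing_by all_goals { apply pv_dec; apply pv_guard_k; assumption }

def dfs (grid : List (List Int)) (x : Int) (y : Int) (tx : Int) (ty : Int) (k : Int) (visited : List (List (List Bool))) : Bool :=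
  (dfsA grid x y tx ty k visited).1

-- ===== PORT B =====
-- layered DP over the remaining-move budget j = 0..k: the working set holds the cells from which
-- the target is reachable when j moves remain, skipping blocked cells and states marked in visited
def dfs_alt (grid : List (List Int)) (x : Int) (y : Int) (tx : Int) (ty : Int) (k : Int) (visited : List (List (List Bool))) : Bool :=
  let n : Int := grid.length
  let m : Int := pvRowLen grid
  if k < 0 ∨ x < 0 ∨ n ≤ x ∨ y < 0 ∨ m ≤ y then false
  else
    let last := (PySem.List.pyRange 0 (k+1) 1).foldl (fun prev j =>
      (PySem.List.pyRange 0 n 1).foldl (fun cur a =>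
        (PySem.List.pyRange 0 m 1).foldl (fun cur b =>
          if pvCell grid a b ≠ 1 ∧ pvVis visited a b j = false ∧
             ((a = tx ∧ b = ty) ∨ PySem.Set.contains prev (a+1, b) ∨
              PySem.Set.contains prev (a-1, b) ∨ PySem.Set.contains prev (a, b+1) ∨
              PySem.Set.contains prev (a, b-1))
          then PySem.Set.add cur (a, b) else cur) cur)
        (PySem.Set.empty : PySem.Set (Int × Int)))
      (PySem.Set.empty : PySem.Set (Int × Int))
    PySem.Set.contains last (x, y)

-- ===== PRECONDITION & SPEC =====
-- Pre_ excludes inputs on which A's (or B's) grid/visited indexing can raise IndexError: unless the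
-- start state already fails A's bounds guard (then both return False touching nothing), the grid must
-- be rectangular and visited must cover every grid cell with depth > k.  This closed-form shape
-- condition over-approximates "some reachable state indexes out of range", so it also drops some
-- inputs on which A happens to return before ever hitting a bad index.
def Pre_dfs (grid : List (List Int)) (x : Int) (y : Int) (tx : Int) (ty : Int) (k : Int) (visited : List (List (List Bool))) : Prop :=
  k < 0 ∨ x < 0 ∨ (grid.length : Int) ≤ x ∨ y < 0 ∨ ((grid.headD []).length : Int) ≤ y ∨
  ((∀ row ∈ grid, row.length = (grid.headD []).length) ∧
   grid.length ≤ visited.length ∧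
   ∀ plane ∈ visited.take grid.length, (grid.headD []).length ≤ plane.length ∧
     ∀ cell ∈ plane.take (grid.headD []).length, k < (cell.length : Int))
instance (grid : List (List Int)) (x : Int) (y : Int) (tx : Int) (ty : Int) (k : Int) (visited : List (List (List Bool))) : Decidable (Pre_dfs grid x y tx ty k visited) := by unfold Pre_dfs; infer_instance

def pvWitness_dfs : List (List Int) × Int × Int × Int × Int × Int × List (List (List Bool)) :=
  ([[0, 0], [0, 0]], 0, 0, 1, 1, 3, [[[false, false, false, false], [false, false, false, false]], [[false, false, false, false], [false, false, false, false]]])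

def Spec_dfs (grid : List (List Int)) (x : Int) (y : Int) (tx : Int) (ty : Int) (k : Int) (visited : List (List (List Bool))) (out : Bool) : Prop := out = dfs_alt grid x y tx ty k visited
instance (grid : List (List Int)) (x : Int) (y : Int) (tx : Int) (ty : Int) (k : Int) (visited : List (List (List Bool))) (out : Bool) : Decidable (Spec_dfs grid x y tx ty k visited out) := by unfold Spec_dfs; infer_instance

-- ===== CLAIM (what is proved, stated in full; the proofs are below) =====
def Claim_equal_dfs : Prop := ∀ (grid : List (List Int)) (x : Int) (y : Int) (tx : Int) (ty : Int) (k : Int) (visited : List (List (List Bool))), Dom_dfs grid x y tx ty k visited → Pre_dfs grid x y tx ty k visited → Spec_dfs grid x y tx ty k visited (dfs grid x y tx ty k visited)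

-- ===== LEMMAS AND PROOFS =====

-- the pure recurrence both ports compute: "from (x,y) with budget k the target is reached",
-- reading visited from the ORIGINAL array w (A's marks are provably invisible: budgets strictly
-- decrease along a path, and a mark lives only at its own budget layer)
def pvG (grid : List (List Int)) (tx ty : Int) (w : List (List (List Bool))) (k x y : Int) : Bool :=
  if k < 0 ∨ x < 0 ∨ (grid.length : Int) ≤ x ∨ y < 0 ∨ pvRowLen grid ≤ y ∨
      pvCell grid x y = 1 ∨ pvVis w x y k = true then false
  else if x = tx ∧ y = ty then true
  else pvG grid tx ty w (k-1) (x+1) y || pvG grid tx ty w (k-1) (x-1) y ||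
       pvG grid tx ty w (k-1) x (y+1) || pvG grid tx ty w (k-1) x (y-1)
termination_by (k+1).toNat
decreasing_by all_goals { apply pv_dec; apply pv_guard_k; assumption }

lemma pvG_guard_false (grid : List (List Int)) (tx ty : Int) (w : List (List (List Bool)))
    (k x y : Int) (h : k < 0 ∨ x < 0 ∨ (grid.length : Int) ≤ x ∨ y < 0 ∨ pvRowLen grid ≤ y) :
    pvG grid tx ty w k x y = false := by
  rw [pvG]
  rcases h with h | h | h | h | h <;> simp [h]

lemma pvG_true_iff (grid : List (List Int)) (tx ty : Int) (w : List (List (List Bool))) (k x y : Int) :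
    pvG grid tx ty w k x y = true ↔
    ¬(k < 0 ∨ x < 0 ∨ (grid.length : Int) ≤ x ∨ y < 0 ∨ pvRowLen grid ≤ y ∨
        pvCell grid x y = 1 ∨ pvVis w x y k = true) ∧
    ((x = tx ∧ y = ty) ∨ pvG grid tx ty w (k-1) (x+1) y = true ∨
      pvG grid tx ty w (k-1) (x-1) y = true ∨ pvG grid tx ty w (k-1) x (y+1) = true ∨
      pvG grid tx ty w (k-1) x (y-1) = true) := by
  rw [pvG]
  by_cases h1 : (k < 0 ∨ x < 0 ∨ (grid.length : Int) ≤ x ∨ y < 0 ∨ pvRowLen grid ≤ y ∨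
      pvCell grid x y = 1 ∨ pvVis w x y k = true)
  · rw [if_pos h1]
    simp only [Bool.false_eq_true, false_iff]
    tauto
  · rw [if_neg h1]
    by_cases h2 : x = tx ∧ y = ty
    · rw [if_pos h2]
      exact ⟨fun _ => ⟨h1, Or.inl h2⟩, fun _ => rfl⟩
    · rw [if_neg h2]
      simp only [Bool.or_eq_true]
      tauto

lemma pyIdx?_nonneg_eq {n : Nat} {i : Int} (hi : 0 ≤ i) {r : Nat}
    (h : PySem.List.pyIdx? n i = some r) : r = i.toNat := by
  simp [PySem.List.pyIdx?, hi] at h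
  exact h.2.symm

-- a mark at budget layer j is invisible at any other nonnegative layer i
lemma pvVis_mark_ne (w : List (List (List Bool))) (a b j : Int) (v : Bool) (p q i : Int)
    (hi : 0 ≤ i) (hj : 0 ≤ j) (hne : i ≠ j) :
    pvVis (pvMark w a b j v) p q i = pvVis w p q i := by
  unfold pvVis pvMark
  simp only [PySem.List.pyGet?, List.length_modify]
  cases h1 : PySem.List.pyIdx? w.length p with
  | none => simp
  | some r1 =>
    by_cases e1 : a.toNat = r1
    · subst e1
      cases h2 : w[a.toNat]? with
      | none => simp [h2, List.getElem?_modify]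
      | some row =>
        simp [h2, List.getElem?_modify, List.length_modify]
        cases h3 : PySem.List.pyIdx? row.length q with
        | none => simp
        | some r2 =>
          by_cases e2 : b.toNat = r2
          · subst e2
            cases h4 : row[b.toNat]? with
            | none => simp [h4]
            | some cell =>
              simp [h4, List.length_set]
              cases h5 : PySem.List.pyIdx? cell.length i with
              | none => simp
              | some r3 =>
                have hr3 : r3 = i.toNat := pyIdx?_nonneg_eq hi h5
                simp only [Option.bind_some]
                rw [List.getElem?_set_ne (by omega)]
          · simp [e2]
    · simp [e1]

-- undoing a mark restores the array exactly (the guard saw the entry as false)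
lemma pvMark_restore (w : List (List (List Bool))) (a b j : Int)
    (ha : 0 ≤ a) (hb : 0 ≤ b) (hj : 0 ≤ j) (hv : pvVis w a b j = false) :
    pvMark (pvMark w a b j true) a b j false = w := by
  unfold pvVis at hv
  unfold pvMark
  apply List.ext_getElem?
  intro n
  simp only [List.getElem?_modify]
  by_cases e1 : a.toNat = n
  · subst e1
    cases h2 : w[a.toNat]? with
    | none => simp
    | some row =>
      simp only [Option.map_eq_map, Option.map_some, reduceIte]
      congr 1
      by_cases hlt1 : a.toNat < w.length
      case neg =>
        exfalso; rw [List.getElem?_eq_none_iff.mpr (by omega)] at h2; exact absurd h2 (by simp)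
      have hget1 : PySem.List.pyGet? w a = some row := by
        rw [PySem.List.pyGet?_of_nonneg _ ha]; exact h2
      rw [hget1, Option.getD_some] at hv
      apply List.ext_getElem?
      intro n2
      simp only [List.getElem?_modify]
      by_cases e2 : b.toNat = n2
      · subst e2
        cases h3 : row[b.toNat]? with
        | none => simp
        | some cell =>
          simp only [Option.map_eq_map, Option.map_some, reduceIte]
          congr 1
          by_cases hlt2 : b.toNat < row.length
          case neg =>
            exfalso; rw [List.getElem?_eq_none_iff.mpr (by omega)] at h3; exact absurd h3 (by simp)
          have hget2 : PySem.List.pyGet? row b = some cell := by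
            rw [PySem.List.pyGet?_of_nonneg _ hb]; exact h3
          rw [hget2, Option.getD_some] at hv
          rw [List.set_set]
          by_cases hltj : j.toNat < cell.length
          · have hgetj : PySem.List.pyGet? cell j = some cell[j.toNat] := by
              rw [PySem.List.pyGet?_of_nonneg _ hj]
              exact List.getElem?_eq_getElem hltj
            rw [hgetj, Option.getD_some] at hv
            rw [← hv]
            exact List.set_getElem_self hltj
          · exact List.set_eq_of_length_le (by omega)
      · simp [e2]
  · simp [e1]

-- A's threaded DFS computes the pure recurrence and restores visited, as long as the threaded
-- array agrees with the original on all budget layers up to the current budget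
lemma dfsA_eq (grid : List (List Int)) (tx ty : Int) (w₀ : List (List (List Bool))) :
    ∀ N (k x y : Int) (w : List (List (List Bool))), (k+1).toNat ≤ N →
    (∀ a b j : Int, 0 ≤ a → 0 ≤ b → 0 ≤ j → j ≤ k → pvVis w a b j = pvVis w₀ a b j) →
    dfsA grid x y tx ty k w = (pvG grid tx ty w₀ k x y, w) := by
  intro N
  induction N with
  | zero =>
    intro k x y w hN hagr
    have hk : k < 0 := by omega
    rw [dfsA, pvG]
    simp [hk]
  | succ N ih =>
    intro k x y w hN hagr
    by_cases hk : k < 0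
    · rw [dfsA, pvG]; simp [hk]
    · have hk0 : 0 ≤ k := by omega
      have hguard : (k < 0 ∨ x < 0 ∨ (grid.length : Int) ≤ x ∨ y < 0 ∨ pvRowLen grid ≤ y ∨
          pvCell grid x y = 1 ∨ pvVis w x y k = true) ↔
          (k < 0 ∨ x < 0 ∨ (grid.length : Int) ≤ x ∨ y < 0 ∨ pvRowLen grid ≤ y ∨
          pvCell grid x y = 1 ∨ pvVis w₀ x y k = true) := by
        by_cases hx : x < 0
        · constructor <;> intro _ <;> tauto
        · by_cases hy : y < 0
          · constructor <;> intro _ <;> tauto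
          · rw [hagr x y k (by omega) (by omega) hk0 le_rfl]
      rw [dfsA, pvG]
      by_cases hg : (k < 0 ∨ x < 0 ∨ (grid.length : Int) ≤ x ∨ y < 0 ∨ pvRowLen grid ≤ y ∨
          pvCell grid x y = 1 ∨ pvVis w₀ x y k = true)
      · rw [if_pos (hguard.mpr hg), if_pos hg]
      · rw [if_neg (fun h => hg (hguard.mp h)), if_neg hg]
        by_cases ht : x = tx ∧ y = ty
        · rw [if_pos ht, if_pos ht]
        · rw [if_neg ht, if_neg ht]
          have hgc := hg
          simp only [not_or] at hgc
          obtain ⟨hgk, hgx, hgxn, hgy, hgym, hgcell, hgvis⟩ := hgc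
          have hx0 : (0:Int) ≤ x := by omega
          have hy0 : (0:Int) ≤ y := by omega
          have hagr' : ∀ a b j : Int, 0 ≤ a → 0 ≤ b → 0 ≤ j → j ≤ k-1 →
              pvVis (pvMark w x y k true) a b j = pvVis w₀ a b j := by
            intro a b j ha hb hj hle
            rw [pvVis_mark_ne w x y k true a b j hj hk0 (by omega)]
            exact hagr a b j ha hb hj (by omega)
          have hNle : (k-1+1).toNat ≤ N := by omega
          have e1 := ih (k-1) (x+1) y (pvMark w x y k true) hNle hagr'
          have e2 := ih (k-1) (x-1) y (pvMark w x y k true) hNle hagr'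
          have e3 := ih (k-1) x (y+1) (pvMark w x y k true) hNle hagr'
          have e4 := ih (k-1) x (y-1) (pvMark w x y k true) hNle hagr'
          have hvf : pvVis w x y k = false := by
            rw [hagr x y k hx0 hy0 hk0 le_rfl]
            exact Bool.not_eq_true _ ▸ (by simpa using hgvis)
          have hrest := pvMark_restore w x y k hx0 hy0 hk0 hvf
          cases hb1 : pvG grid tx ty w₀ (k-1) (x+1) y <;>
          cases hb2 : pvG grid tx ty w₀ (k-1) (x-1) y <;>
          cases hb3 : pvG grid tx ty w₀ (k-1) x (y+1) <;>
          cases hb4 : pvG grid tx ty w₀ (k-1) x (y-1) <;>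
            simp [e1, e2, e3, e4, hb1, hb2, hb3, hb4, hrest]

lemma dfs_eq_pvG (grid : List (List Int)) (x y tx ty k : Int) (visited : List (List (List Bool))) :
    dfs grid x y tx ty k visited = pvG grid tx ty visited k x y := by
  unfold dfs
  rw [dfsA_eq grid tx ty visited (k+1).toNat k x y visited le_rfl (fun _ _ _ _ _ _ _ => rfl)]

-- membership after a conditional-add fold over one list (one row of B's sweep)
lemma mem_fold_add_row (cond : Int → Int → Prop) [∀ a b, Decidable (cond a b)] (a : Int)
    (z : Int × Int) : ∀ (l : List Int) (s : PySem.Set (Int × Int)),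
    z ∈ l.foldl (fun cur b => if cond a b then PySem.Set.add cur (a, b) else cur) s ↔
      z ∈ s ∨ ∃ b ∈ l, cond a b ∧ z = (a, b) := by
  intro l
  induction l with
  | nil => simp
  | cons hd tl ih =>
    intro s
    rw [List.foldl_cons, ih]
    by_cases hc : cond a hd
    · simp only [if_pos hc, PySem.Set.mem_add, List.mem_cons]
      constructor
      · rintro (⟨h | h⟩ | ⟨b, hb, hcb, rfl⟩)
        · exact Or.inl h
        · exact Or.inr ⟨hd, Or.inl rfl, hc, h⟩
        · exact Or.inr ⟨b, Or.inr hb, hcb, rfl⟩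
      · rintro (h | ⟨b, (rfl | hb), hcb, rfl⟩)
        · exact Or.inl (Or.inl h)
        · exact Or.inl (Or.inr rfl)
        · exact Or.inr ⟨b, hb, hcb, rfl⟩
    · simp only [if_neg hc, List.mem_cons]
      constructor
      · rintro (h | ⟨b, hb, hcb, rfl⟩)
        · exact Or.inl h
        · exact Or.inr ⟨b, Or.inr hb, hcb, rfl⟩
      · rintro (h | ⟨b, (rfl | hb), hcb, rfl⟩)
        · exact Or.inl h
        · exact absurd hcb hc
        · exact Or.inr ⟨b, hb, hcb, rfl⟩

-- membership after one row of B's sweep over the column range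
lemma mem_row_sweep (cond : Int → Int → Prop) [∀ a b, Decidable (cond a b)] (m : Int) (a : Int)
    (z : Int × Int) (s : PySem.Set (Int × Int)) :
    z ∈ (PySem.List.pyRange 0 m 1).foldl (fun cur b =>
        if cond a b then PySem.Set.add cur (a, b) else cur) s ↔
      z ∈ s ∨ (z.1 = a ∧ 0 ≤ z.2 ∧ z.2 < m ∧ cond a z.2) := by
  rw [mem_fold_add_row]
  obtain ⟨p, q⟩ := z
  constructor
  · rintro (h | ⟨b, hb, hcb, h⟩)
    · exact Or.inl h
    · rw [PySem.List.mem_pyRange_one] at hb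
      cases h
      exact Or.inr ⟨rfl, hb.1, hb.2, hcb⟩
  · rintro (h | ⟨rfl, h0, hm, hc⟩)
    · exact Or.inl h
    · exact Or.inr ⟨q, PySem.List.mem_pyRange_one.mpr ⟨h0, hm⟩, hc, rfl⟩

-- membership after one full (a,b)-sweep of B's layer loop, starting from the empty set
lemma mem_sweep (cond : Int → Int → Prop) [∀ a b, Decidable (cond a b)] (n m : Int) (z : Int × Int) :
    z ∈ (PySem.List.pyRange 0 n 1).foldl (fun cur a =>
        (PySem.List.pyRange 0 m 1).foldl (fun cur b =>
          if cond a b then PySem.Set.add cur (a, b) else cur) cur)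
        (PySem.Set.empty : PySem.Set (Int × Int)) ↔
      0 ≤ z.1 ∧ z.1 < n ∧ 0 ≤ z.2 ∧ z.2 < m ∧ cond z.1 z.2 := by
  have aux : ∀ (l : List Int) (s : PySem.Set (Int × Int)),
      z ∈ l.foldl (fun cur a => (PySem.List.pyRange 0 m 1).foldl (fun cur b =>
          if cond a b then PySem.Set.add cur (a, b) else cur) cur) s ↔
        z ∈ s ∨ ∃ a ∈ l, z.1 = a ∧ 0 ≤ z.2 ∧ z.2 < m ∧ cond a z.2 := by
    intro l
    induction l with
    | nil => simp
    | cons hd tl ih =>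
      intro s
      rw [List.foldl_cons, ih, mem_row_sweep]
      simp only [List.mem_cons]
      constructor
      · rintro (⟨h | h⟩ | ⟨b, hb, h⟩)
        · exact Or.inl h
        · exact Or.inr ⟨hd, Or.inl rfl, h⟩
        · exact Or.inr ⟨b, Or.inr hb, h⟩
      · rintro (h | ⟨b, (rfl | hb), h⟩)
        · exact Or.inl (Or.inl h)
        · exact Or.inl (Or.inr h)
        · exact Or.inr ⟨b, hb, h⟩
  rw [aux]
  simp only [PySem.Set.empty]
  constructor
  · rintro (h | ⟨a, ha, rfl, h⟩)
    · simp at h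
    · rw [PySem.List.mem_pyRange_one] at ha
      exact ⟨ha.1, ha.2, h⟩
  · rintro ⟨h1, h2, h⟩
    exact Or.inr ⟨z.1, PySem.List.mem_pyRange_one.mpr ⟨h1, h2⟩, rfl, h⟩

-- after processing budgets 0..j, B's working set is exactly the cells with pvG j
lemma layer_eq (grid : List (List Int)) (tx ty : Int) (w : List (List (List Bool))) :
    ∀ (j : Nat) (p q : Int),
    ((p, q) ∈ (PySem.List.pyRange 0 ((j : Int)+1) 1).foldl (fun prev i =>
      (PySem.List.pyRange 0 ((grid.length : Int)) 1).foldl (fun cur a =>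
        (PySem.List.pyRange 0 (pvRowLen grid) 1).foldl (fun cur b =>
          if pvCell grid a b ≠ 1 ∧ pvVis w a b i = false ∧
             ((a = tx ∧ b = ty) ∨ PySem.Set.contains prev (a+1, b) ∨
              PySem.Set.contains prev (a-1, b) ∨ PySem.Set.contains prev (a, b+1) ∨
              PySem.Set.contains prev (a, b-1))
          then PySem.Set.add cur (a, b) else cur) cur)
        (PySem.Set.empty : PySem.Set (Int × Int)))
      (PySem.Set.empty : PySem.Set (Int × Int)))
    ↔ pvG grid tx ty w (j : Int) p q = true := by
  intro j
  induction j with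
  | zero =>
    intro p q
    have h1 : PySem.List.pyRange 0 (((0:Nat) : Int)+1) 1 = [0] := by
      simpa using PySem.List.pyRange_one_singleton (a := 0)
    rw [h1, List.foldl_cons, List.foldl_nil,
      mem_sweep (fun a b => pvCell grid a b ≠ 1 ∧ pvVis w a b 0 = false ∧
        ((a = tx ∧ b = ty) ∨ PySem.Set.contains PySem.Set.empty (a+1, b) ∨
         PySem.Set.contains PySem.Set.empty (a-1, b) ∨ PySem.Set.contains PySem.Set.empty (a, b+1) ∨
         PySem.Set.contains PySem.Set.empty (a, b-1))) (grid.length : Int) (pvRowLen grid) (p, q)]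
    rw [pvG_true_iff]
    have hc : ∀ z : Int × Int, PySem.Set.contains (PySem.Set.empty : PySem.Set (Int × Int)) z = false := by
      intro z; rfl
    have hneg : ∀ (kk : Int), kk < 0 → ∀ a b : Int, pvG grid tx ty w kk a b = false :=
      fun kk hkk a b => pvG_guard_false grid tx ty w kk a b (Or.inl hkk)
    simp only [hc, Bool.false_eq_true, or_false]
    constructor
    · rintro ⟨h0p, hpn, h0q, hqm, hcell, hvis, htgt⟩
      refine ⟨?_, Or.inl htgt⟩
      simp only [not_or, not_lt, not_le]
      exact ⟨by omega, h0p, hpn, h0q, hqm, hcell, by simp [hvis]⟩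
    · rintro ⟨hg, htgt | hfalse⟩
      · simp only [not_or, not_lt, not_le] at hg
        exact ⟨hg.2.1, hg.2.2.1, hg.2.2.2.1, hg.2.2.2.2.1, hg.2.2.2.2.2.1,
          by simpa using hg.2.2.2.2.2.2, htgt⟩
      · rcases hfalse with h | h | h | h <;>
          (rw [hneg _ (by omega)] at h; exact absurd h (by simp))
  | succ j ih =>
    intro p q
    have hcast : (((j+1:Nat)) : Int) + 1 = ((j:Int) + 1) + 1 := by push_cast; ring
    rw [hcast, PySem.List.pyRange_one_succ_right (by omega), List.foldl_append,
      List.foldl_cons, List.foldl_nil]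
    set prev := (PySem.List.pyRange 0 ((j : Int)+1) 1).foldl (fun prev i =>
      (PySem.List.pyRange 0 ((grid.length : Int)) 1).foldl (fun cur a =>
        (PySem.List.pyRange 0 (pvRowLen grid) 1).foldl (fun cur b =>
          if pvCell grid a b ≠ 1 ∧ pvVis w a b i = false ∧
             ((a = tx ∧ b = ty) ∨ PySem.Set.contains prev (a+1, b) ∨
              PySem.Set.contains prev (a-1, b) ∨ PySem.Set.contains prev (a, b+1) ∨
              PySem.Set.contains prev (a, b-1))
          then PySem.Set.add cur (a, b) else cur) cur)
        (PySem.Set.empty : PySem.Set (Int × Int)))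
      (PySem.Set.empty : PySem.Set (Int × Int)) with hprev
    have hmem : ∀ z : Int × Int, PySem.Set.contains prev z = pvG grid tx ty w (j : Int) z.1 z.2 := by
      intro z
      by_cases hz : z ∈ prev
      · rw [(PySem.Set.contains_iff prev z).mpr hz]
        exact ((ih z.1 z.2).mp (by simpa using hz)).symm
      · have h1 : PySem.Set.contains prev z = false := by
          cases hcc : PySem.Set.contains prev z
          · rfl
          · exact absurd ((PySem.Set.contains_iff prev z).mp hcc) hz
        rw [h1]
        by_cases hg : pvG grid tx ty w (j : Int) z.1 z.2 = true
        · exact absurd ((ih z.1 z.2).mpr (by simpa using hg)) hz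
        · simp at hg; rw [hg]
    rw [mem_sweep (fun a b => pvCell grid a b ≠ 1 ∧ pvVis w a b ((j:Int)+1) = false ∧
        ((a = tx ∧ b = ty) ∨ PySem.Set.contains prev (a+1, b) ∨
         PySem.Set.contains prev (a-1, b) ∨ PySem.Set.contains prev (a, b+1) ∨
         PySem.Set.contains prev (a, b-1))) (grid.length : Int) (pvRowLen grid) (p, q)]
    rw [pvG_true_iff]
    have hsub : ((j:Int) + 1) - 1 = (j : Int) := by ring
    simp only [hmem]
    constructor
    · rintro ⟨h0p, hpn, h0q, hqm, hcell, hvis, hrest⟩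
      exact ⟨by simp [hvis]; omega, by simpa using hrest⟩
    · rintro ⟨hg, hrest⟩
      simp only [not_or, not_lt, not_le] at hg
      exact ⟨hg.2.1, hg.2.2.1, hg.2.2.2.1, hg.2.2.2.2.1, hg.2.2.2.2.2.1,
        by simpa using hg.2.2.2.2.2.2, by simpa using hrest⟩

lemma dfs_alt_eq_pvG (grid : List (List Int)) (x y tx ty k : Int) (visited : List (List (List Bool))) :
    dfs_alt grid x y tx ty k visited = pvG grid tx ty visited k x y := by
  unfold dfs_alt
  dsimp only
  by_cases hg : (k < 0 ∨ x < 0 ∨ (grid.length : Int) ≤ x ∨ y < 0 ∨ pvRowLen grid ≤ y)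
  · rw [if_pos hg, pvG_guard_false grid tx ty visited k x y hg]
  · rw [if_neg hg]
    have hk0 : 0 ≤ k := by
      rcases not_or.mp hg with ⟨h, _⟩; omega
    have hkeq : k = ((k.toNat : Nat) : Int) := (Int.toNat_of_nonneg hk0).symm
    rw [hkeq, Bool.eq_iff_iff, PySem.Set.contains_iff]
    exact layer_eq grid tx ty visited k.toNat x y

-- ===== VERDICT (by name: the statement is the Claim_ definition above) =====
theorem dfs_spec : Claim_equal_dfs := by
  intro grid x y tx ty k visited _ _
  unfold Spec_dfs
  rw [dfs_eq_pvG, dfs_alt_eq_pvG]
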